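-- pv_equiv track=rewrite | github.com/yuriisamohvalov-creator/vm-inventory | backend/inventory/models.py | build_tags
-- ===== SOURCE A (Python) =====
-- def build_tags(os_tag, info_system_code, custom_tags):
--     """Build tags list: [OS, IS_CODE, ...custom in UPPER_CASE]."""
--     tags = [os_tag.upper() if os_tag else 'LINUX']
--     tags.append((info_system_code or '').strip().upper().replace(' ', '_'))
--     for t in (custom_tags or []):
--         tag = (t or '').strip().upper().replace(' ', '_')
--         if tag and tag not in tags:
--             tags.append(tag)
--     return tags
-- ===== SOURCE B (Python) =====
-- def build_tags(os_tag, info_system_code, custom_tags):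
--     """Build tags list: [OS, IS_CODE, ...custom in UPPER_CASE]."""
--     first = os_tag.upper() if os_tag else 'LINUX'
--     second = (info_system_code or '').strip().upper().replace(' ', '_')
--     norm = [(t or '').strip().upper().replace(' ', '_') for t in (custom_tags or [])]
--     keep = set(norm) - {'', first, second}
--     extras = sorted(keep, key=norm.index)
--     return [first, second] + extras
-- ===== Notes on version B (the rewrite author's own statement) =====
-- stated objective: alternative
-- what changed: Replaces A's grow-and-check loop (appending each tag after a membership scan of the growing result) with a set-difference to select the distinct admissible tags and a sort keyed by first-occurrence index (norm.index) to recover A's output order.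
import Mathlib
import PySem

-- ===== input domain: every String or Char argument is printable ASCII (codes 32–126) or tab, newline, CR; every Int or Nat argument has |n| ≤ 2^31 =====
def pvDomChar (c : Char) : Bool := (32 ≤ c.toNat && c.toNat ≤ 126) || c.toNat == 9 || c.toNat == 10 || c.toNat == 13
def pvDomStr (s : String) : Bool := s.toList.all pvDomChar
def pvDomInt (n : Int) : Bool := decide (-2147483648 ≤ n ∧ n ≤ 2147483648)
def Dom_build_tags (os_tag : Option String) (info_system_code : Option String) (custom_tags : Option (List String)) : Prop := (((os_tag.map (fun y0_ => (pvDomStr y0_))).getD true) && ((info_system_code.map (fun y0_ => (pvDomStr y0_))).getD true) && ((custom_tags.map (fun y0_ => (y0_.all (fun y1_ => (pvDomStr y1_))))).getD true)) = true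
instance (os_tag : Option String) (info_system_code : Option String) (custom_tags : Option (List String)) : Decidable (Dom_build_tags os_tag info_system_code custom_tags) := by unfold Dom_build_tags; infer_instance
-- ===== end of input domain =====

-- B replaces A's grow-and-check loop with a set difference selecting the distinct
-- admissible custom tags and a sort keyed by first-occurrence index (norm.index)
-- that recovers A's first-occurrence output order.
-- ===== PORT A =====
-- A: one grow-and-check loop that appends each normalized custom tag unless already present.
def build_tags (os_tag : Option String) (info_system_code : Option String) (custom_tags : Option (List String)) : List String :=
  let tags : List String := [if os_tag.getD "" ≠ "" then PySem.Str.upper (os_tag.getD "") else "LINUX"]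
  let tags := tags ++ [PySem.Str.replace (PySem.Str.upper (PySem.Str.strip (info_system_code.getD ""))) " " "_"]
  (custom_tags.getD []).foldl
    (fun tags t =>
      let tag := PySem.Str.replace (PySem.Str.upper (PySem.Str.strip t)) " " "_"
      if tag ≠ "" ∧ tag ∉ tags then tags ++ [tag] else tags)
    tags

-- ===== PORT B =====
-- B: normalize, set difference against {'', first, second}, then sort the surviving
-- distinct tags by their first-occurrence index in the normalized list (norm.index).
-- norm.index(x) never raises here since every member of the set occurs in norm, so
-- '(index? norm x).getD 0' is exact.
def build_tags_alt (os_tag : Option String) (info_system_code : Option String) (custom_tags : Option (List String)) : List String :=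
  let first := if os_tag.getD "" ≠ "" then PySem.Str.upper (os_tag.getD "") else "LINUX"
  let second := PySem.Str.replace (PySem.Str.upper (PySem.Str.strip (info_system_code.getD ""))) " " "_"
  let norm := (custom_tags.getD []).map (fun t => PySem.Str.replace (PySem.Str.upper (PySem.Str.strip t)) " " "_")
  let keep := PySem.Set.diff (PySem.Set.ofList norm) ["", first, second]
  let extras := PySem.List.sorted keep (fun x => (PySem.List.index? norm x).getD 0) false
  [first, second] ++ extras

-- ===== PRECONDITION & SPEC =====
def Spec_build_tags (os_tag : Option String) (info_system_code : Option String) (custom_tags : Option (List String)) (out : List String) : Prop := out = build_tags_alt os_tag info_system_code custom_tags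
instance (os_tag : Option String) (info_system_code : Option String) (custom_tags : Option (List String)) (out : List String) : Decidable (Spec_build_tags os_tag info_system_code custom_tags out) := by unfold Spec_build_tags; infer_instance

-- ===== CLAIM (what is proved, stated in full; the proofs are below) =====
def Claim_equal_build_tags : Prop := ∀ (os_tag : Option String) (info_system_code : Option String) (custom_tags : Option (List String)), Dom_build_tags os_tag info_system_code custom_tags → Spec_build_tags os_tag info_system_code custom_tags (build_tags os_tag info_system_code custom_tags)

-- ===== LEMMAS AND PROOFS =====

-- proof-only helper: first occurrences of l not already in `seen`
def fdedup : List String → List String → List String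
  | [], _ => []
  | x :: rest, seen => if x ∈ seen then fdedup rest seen else x :: fdedup rest (x :: seen)

theorem fdedup_congr (l : List String) (s s' : List String)
    (h : ∀ y, y ∈ s ↔ y ∈ s') : fdedup l s = fdedup l s' := by
  induction l generalizing s s' with
  | nil => rfl
  | cons x rest ih =>
    simp only [fdedup]
    by_cases hx : x ∈ s
    · rw [if_pos hx, if_pos ((h x).mp hx), ih s s' h]
    · rw [if_neg hx, if_neg (fun hc => hx ((h x).mpr hc))]
      exact congrArg (x :: ·) (ih _ _ (fun y => by simp [List.mem_cons, h y]))

-- PySem.Set.ofList's foldl, started from any accumulator, appends fdedup of the rest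
theorem foldl_add_eq (l : List String) (acc : List String) :
    l.foldl PySem.Set.add acc = acc ++ fdedup l acc := by
  induction l generalizing acc with
  | nil => simp [fdedup]
  | cons x rest ih =>
    simp only [List.foldl_cons, fdedup, PySem.Set.add]
    by_cases hx : x ∈ acc
    · have hc : PySem.Set.contains acc x = true := by simp [pysem, hx]
      simp [hx, ih]
    · have hc : PySem.Set.contains acc x = false := by simp [pysem, hx]
      rw [hc]
      simp only [Bool.false_eq_true, if_false, if_neg hx]
      rw [ih (acc ++ [x]),
        fdedup_congr rest (acc ++ [x]) (x :: acc)
          (fun y => by simp [List.mem_append, List.mem_cons, or_comm])]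
      simp [List.append_assoc]

-- filtered fdedup only cares about the non-empty members of the seen-list
theorem filter_fdedup_congr (l : List String) (s s' : List String)
    (h : ∀ y, y ≠ "" → (y ∈ s ↔ y ∈ s')) :
    (fdedup l s).filter (fun x => x ≠ "") = (fdedup l s').filter (fun x => x ≠ "") := by
  induction l generalizing s s' with
  | nil => rfl
  | cons x rest ih =>
    simp only [fdedup]
    by_cases hxe : x = ""
    · subst hxe
      by_cases h1 : "" ∈ s <;> by_cases h2 : "" ∈ s'
      · rw [if_pos h1, if_pos h2]
        exact ih s s' h
      · rw [if_pos h1, if_neg h2, List.filter_cons_of_neg (by simp)]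
        exact ih s ("" :: s') (fun y hy => by
          have := h y hy; simp only [List.mem_cons]; tauto)
      · rw [if_neg h1, if_pos h2, List.filter_cons_of_neg (by simp)]
        exact ih ("" :: s) s' (fun y hy => by
          have := h y hy; simp only [List.mem_cons]; tauto)
      · rw [if_neg h1, if_neg h2, List.filter_cons_of_neg (by simp),
          List.filter_cons_of_neg (by simp)]
        exact ih ("" :: s) ("" :: s') (fun y hy => by
          have := h y hy; simp only [List.mem_cons]; tauto)
    · have hm := h x hxe
      by_cases hx : x ∈ s
      · rw [if_pos hx, if_pos (hm.mp hx)]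
        exact ih s s' h
      · rw [if_neg hx, if_neg (fun hc => hx (hm.mpr hc)),
          List.filter_cons_of_pos (by simp [hxe]), List.filter_cons_of_pos (by simp [hxe])]
        exact congrArg (x :: ·) (ih (x :: s) (x :: s') (fun y hy => by
          have := h y hy; simp only [List.mem_cons]; tauto))

-- A's loop equals the non-empty first occurrences not already in the accumulator
theorem foldl_stepA_eq (l : List String) (acc : List String) :
    l.foldl (fun tags tag => if tag ≠ "" ∧ tag ∉ tags then tags ++ [tag] else tags) acc
      = acc ++ (fdedup l acc).filter (fun x => x ≠ "") := by
  induction l generalizing acc with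
  | nil => simp [fdedup]
  | cons x rest ih =>
    simp only [List.foldl_cons, fdedup]
    by_cases hx : x ∈ acc
    · rw [if_neg (fun hc => hc.2 hx), if_pos hx, ih]
    · by_cases hxe : x = ""
      · subst hxe
        rw [if_neg (fun hc => hc.1 rfl), if_neg hx, ih,
          List.filter_cons_of_neg (by simp)]
        exact congrArg (acc ++ ·) (filter_fdedup_congr rest acc ("" :: acc)
          (fun y hy => by simp [List.mem_cons, hy]))
      · rw [if_pos ⟨hxe, hx⟩, if_neg hx, ih,
          fdedup_congr rest (acc ++ [x]) (x :: acc)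
            (fun y => by simp [List.mem_append, List.mem_cons, or_comm]),
          List.filter_cons_of_pos (by simp [hxe])]
        simp [List.append_assoc]

-- dropping a seen-list is filtering it out of the fresh fdedup
theorem fdedup_append_filter (l : List String) (s₁ s₂ : List String) :
    fdedup l (s₁ ++ s₂) = (fdedup l s₂).filter (fun x => decide (x ∉ s₁)) := by
  induction l generalizing s₂ with
  | nil => rfl
  | cons x rest ih =>
    simp only [fdedup]
    by_cases h2 : x ∈ s₂
    · rw [if_pos (List.mem_append.mpr (Or.inr h2)), if_pos h2]
      exact ih s₂
    · by_cases h1 : x ∈ s₁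
      · rw [if_pos (List.mem_append.mpr (Or.inl h1)), if_neg h2,
          List.filter_cons_of_neg (by simp [h1]), ← ih (x :: s₂),
          fdedup_congr rest (s₁ ++ x :: s₂) (s₁ ++ s₂)
            (fun y => by
              simp only [List.mem_append, List.mem_cons]
              constructor
              · rintro (hy | rfl | hy)
                exacts [Or.inl hy, Or.inl h1, Or.inr hy]
              · rintro (hy | hy)
                exacts [Or.inl hy, Or.inr (Or.inr hy)])]
      · rw [if_neg (fun hc => (List.mem_append.mp hc).elim h1 h2), if_neg h2,
          List.filter_cons_of_pos (by simp [h1])]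
        exact congrArg (x :: ·) (by
          rw [← ih (x :: s₂),
            fdedup_congr rest (s₁ ++ x :: s₂) (x :: (s₁ ++ s₂))
              (fun y => by simp only [List.mem_append, List.mem_cons]; tauto)])

-- idxOf steps over a differing head
theorem idx_cons_ne (x a : String) (l : List String) (h : ¬ x = a) :
    (x :: l).idxOf a = l.idxOf a + 1 := by
  simp [h]

-- members of fdedup come from l and avoid the seen-list
theorem mem_fdedup (l s : List String) (b : String) (hb : b ∈ fdedup l s) : b ∈ l ∧ b ∉ s := by
  induction l generalizing s with
  | nil => simp [fdedup] at hb
  | cons x rest ih =>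
    simp only [fdedup] at hb
    by_cases hx : x ∈ s
    · rw [if_pos hx] at hb
      have := ih s hb
      exact ⟨List.mem_cons_of_mem _ this.1, this.2⟩
    · rw [if_neg hx] at hb
      rcases List.mem_cons.mp hb with rfl | hb'
      · exact ⟨List.mem_cons_self, hx⟩
      · have := ih (x :: s) hb'
        exact ⟨List.mem_cons_of_mem _ this.1, fun hc => this.2 (List.mem_cons_of_mem _ hc)⟩

-- fdedup lists its elements in strictly increasing first-occurrence order
theorem fdedup_pairwise_idxOf (l s : List String) :
    (fdedup l s).Pairwise (fun a b => l.idxOf a < l.idxOf b) := by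
  induction l generalizing s with
  | nil => simp [fdedup]
  | cons x rest ih =>
    have step : ∀ s' : List String, x ∈ s' →
        (fdedup rest s').Pairwise (fun a b => (x :: rest).idxOf a < (x :: rest).idxOf b) := by
      intro s' hx
      refine (ih s').imp_of_mem ?_
      intro a b ha hb hlt
      have hna : a ≠ x := fun hc => (mem_fdedup rest s' a ha).2 (hc ▸ hx)
      have hnb : b ≠ x := fun hc => (mem_fdedup rest s' b hb).2 (hc ▸ hx)
      rw [idx_cons_ne x a rest (fun hc => hna hc.symm), idx_cons_ne x b rest (fun hc => hnb hc.symm)]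
      omega
    simp only [fdedup]
    by_cases hx : x ∈ s
    · rw [if_pos hx]; exact step s hx
    · rw [if_neg hx]
      refine List.pairwise_cons.mpr ⟨?_, step (x :: s) List.mem_cons_self⟩
      intro b hb
      have hnb : b ≠ x := fun hc =>
        (mem_fdedup rest (x :: s) b hb).2 (hc ▸ List.mem_cons_self)
      rw [List.idxOf_cons_self, idx_cons_ne x b rest (fun hc => hnb hc.symm)]
      omega

-- norm.index on a member, with the default discharged
theorem index_getD_of_mem (l : List String) (a : String) (h : a ∈ l) :
    (PySem.List.index? l a).getD 0 = l.idxOf a := by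
  induction l with
  | nil => simp at h
  | cons x rest ih =>
    by_cases hax : x = a
    · subst hax
      rw [PySem.List.index?_cons_self, List.idxOf_cons_self]; rfl
    · rw [PySem.List.index?_cons_of_ne rest hax, idx_cons_ne x a rest hax]
      have ha : a ∈ rest := by
        rcases List.mem_cons.mp h with rfl | h'
        · exact absurd rfl hax
        · exact h'
      rw [← ih ha]
      rcases ho : PySem.List.index? rest a with _ | k
      · rw [PySem.List.index?_eq_none_iff] at ho; exact absurd ha ho
      · simp

-- ===== VERDICT (by name: the statement is the Claim_ definition above) =====
theorem build_tags_spec : Claim_equal_build_tags := by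
  intro os_tag info_system_code custom_tags _
  unfold Spec_build_tags build_tags build_tags_alt
  simp only []
  rw [← List.foldl_map
    (f := fun t => PySem.Str.replace (PySem.Str.upper (PySem.Str.strip t)) " " "_")
    (g := fun tags tag => if tag ≠ "" ∧ tag ∉ tags then tags ++ [tag] else tags),
    foldl_stepA_eq]
  set f := if os_tag.getD "" ≠ "" then PySem.Str.upper (os_tag.getD "") else "LINUX" with hf
  set s := PySem.Str.replace (PySem.Str.upper (PySem.Str.strip (info_system_code.getD ""))) " " "_" with hs
  set n := (custom_tags.getD []).map
    (fun t => PySem.Str.replace (PySem.Str.upper (PySem.Str.strip t)) " " "_") with hn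
  -- identify the set built by B with fdedup
  have hofl : PySem.Set.ofList n = fdedup n [] := by
    rw [PySem.Set.ofList_eq_foldl, foldl_add_eq, List.nil_append]
  -- B's sort is the identity on the already-ordered keep list
  have hkeep : PySem.Set.diff (PySem.Set.ofList n) ["", f, s]
      = (fdedup n []).filter (fun x => !PySem.Set.contains ["", f, s] x) := by
    rw [hofl]; rfl
  have hpair : (PySem.Set.diff (PySem.Set.ofList n) ["", f, s]).Pairwise
      (fun a b => (PySem.List.index? n a).getD 0 < (PySem.List.index? n b).getD 0) := by
    rw [hkeep]
    refine ((fdedup_pairwise_idxOf n []).filter _).imp_of_mem ?_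
    intro a b ha hb hlt
    have ha' : a ∈ n := (mem_fdedup n [] a (List.mem_of_mem_filter ha)).1
    have hb' : b ∈ n := (mem_fdedup n [] b (List.mem_of_mem_filter hb)).1
    rw [index_getD_of_mem n a ha', index_getD_of_mem n b hb']
    exact hlt
  rw [PySem.List.sorted_eq_of_perm_of_pairwise_lt _ _ _ (List.Perm.refl _) hpair, hkeep]
  -- A's extras: push the seen-list [f, s] into a filter and merge the two filters
  have hdk : fdedup n ([f] ++ [s]) = (fdedup n []).filter (fun x => decide (x ∉ [f, s])) := by
    simpa using fdedup_append_filter n [f, s] []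
  simp only [List.singleton_append] at hdk ⊢
  rw [hdk, List.filter_filter]
  congr 1
  apply List.filter_congr
  intro x _
  by_cases h1 : x = "" <;> by_cases h2 : x = f <;> by_cases h3 : x = s <;>
    simp [h1, h2, h3, PySem.Set.contains, List.mem_cons]
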